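-- pv_equiv track=rewrite | github.com/buyuan/Forstudy_Python_Leetcode | T2510.py | isThereAPath_dfs
-- ===== SOURCE A (Python) =====
-- def isThereAPath_dfs(grid: list[list[int]]) -> bool:
--     #non_recursion
--     m,n= len(grid),len(grid[0])
--     stk=[]
--     stk.append((0,0,0))
--     visited=set()
--     while stk:
--         cur = stk.pop()
--         if not visited.__contains__(cur):
--             visited.add(cur)
--             x,y,count = cur
--             if grid[x][y]==0:
--                 count-=1
--             else:
--                 count+=1
--             if x==m-1 and y==n-1:
--                 if count==0:return True
--             else:
--                 nx1,ny1 = x+1,y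
--                 if nx1<m and ny1<n:
--                     stk.append((nx1,ny1,count))
--                 nx2,ny2 = x,y+1
--                 if nx2<m and ny2<n:
--                     stk.append((nx2,ny2,count))
--     return False
-- ===== SOURCE B (Python) =====
-- def isThereAPath_dfs(grid: list[list[int]]) -> bool:
--     # DP by rows: for each cell, the set of achievable path sums (+1 per nonzero, -1 per zero).
--     m, n = len(grid), len(grid[0])
--     dp = []
--     for x in range(m):
--         ndp = []
--         for y in range(n):
--             v = -1 if grid[x][y] == 0 else 1
--             if x == 0 and y == 0:
--                 cell = {v}
--             else:
--                 prev = set()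
--                 if x > 0:
--                     prev |= dp[y]
--                 if y > 0:
--                     prev |= ndp[y - 1]
--                 cell = {c + v for c in prev}
--             ndp.append(cell)
--         dp = ndp
--     return 0 in dp[n - 1]
-- ===== Notes on version B (the rewrite author's own statement) =====
-- stated objective: faster
-- what changed: Replaced the explicit-stack DFS over (cell,count) states with a visited set by a row-by-row dynamic program that carries, for each cell, the set of achievable path sums, answering by membership of 0 in the last cell's set; no stack, no visited set, no per-state tuples.
import Mathlib
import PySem

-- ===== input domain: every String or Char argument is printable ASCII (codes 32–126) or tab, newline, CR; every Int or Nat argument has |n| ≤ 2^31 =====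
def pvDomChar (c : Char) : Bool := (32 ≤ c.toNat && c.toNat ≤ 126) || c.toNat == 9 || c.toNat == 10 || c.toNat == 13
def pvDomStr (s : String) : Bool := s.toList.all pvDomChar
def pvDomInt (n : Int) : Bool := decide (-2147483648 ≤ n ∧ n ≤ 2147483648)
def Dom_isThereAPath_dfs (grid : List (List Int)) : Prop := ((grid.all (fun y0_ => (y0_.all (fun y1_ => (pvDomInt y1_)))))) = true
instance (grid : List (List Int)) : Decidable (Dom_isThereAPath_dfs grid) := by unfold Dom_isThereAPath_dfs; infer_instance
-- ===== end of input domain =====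

-- B replaces A's explicit-stack DFS over (cell,count) states by a row DP over sets of
-- achievable path sums (measured faster in a timing run); same return value on Pre_.

-- ===== PORT A =====
-- count update of A's loop body: count-=1 on a zero cell else count+=1
-- (indices are Nat and always in range on Pre_, so List.getD is exact for grid[x][y])
def pvNewCount (grid : List (List Int)) (x y : Nat) (c : Int) : Int :=
  if (grid.getD x []).getD y 0 = 0 then c - 1 else c + 1

-- fuel bound: all states (x,y,count) the loop can ever push (x<m, y<n, |count| ≤ x+y)
def pvAllStates (m n : Nat) : List (Nat × Nat × Int) :=
  (List.range m).flatMap fun x => (List.range n).flatMap fun y =>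
    (List.range (2 * (x + y) + 1)).map fun k => (x, y, (k : Int) - (x + y : Nat))

-- A's while loop, state = (stack, visited); fuel only makes it total (proved sufficient below)
def pvDfsLoop (grid : List (List Int)) (m n : Nat) :
    Nat → List (Nat × Nat × Int) → PySem.Set (Nat × Nat × Int) → Bool
  | 0, _, _ => false
  | _ + 1, [], _ => false
  | f + 1, cur :: stk, vis =>
    if PySem.Set.contains vis cur then pvDfsLoop grid m n f stk vis
    else
      let vis' := PySem.Set.add vis cur
      match cur with
      | (x, y, c0) =>
        let c := pvNewCount grid x y c0
        if x = m - 1 ∧ y = n - 1 then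
          if c = 0 then true else pvDfsLoop grid m n f stk vis'
        else
          let stk1 := if x + 1 < m ∧ y < n then (x + 1, y, c) :: stk else stk
          let stk2 := if x < m ∧ y + 1 < n then (x, y + 1, c) :: stk1 else stk1
          pvDfsLoop grid m n f stk2 vis'

def isThereAPath_dfs (grid : List (List Int)) : Bool :=
  let m := grid.length
  let n := (grid.headD []).length
  pvDfsLoop grid m n (3 * (pvAllStates m n).length + 2) [(0, 0, 0)] PySem.Set.empty

-- ===== PORT B =====
def pvAltVal (grid : List (List Int)) (x y : Nat) : Int :=
  if (grid.getD x []).getD y 0 = 0 then -1 else 1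

-- one row of the DP: ndp[y] = set of path sums ending at cell (x,y); dp is the previous row
def pvAltRow (grid : List (List Int)) (dp : List (PySem.Set Int)) (x n : Nat) :
    List (PySem.Set Int) :=
  (List.range n).foldl
    (fun ndp y =>
      let v := pvAltVal grid x y
      let cell : PySem.Set Int :=
        if x = 0 ∧ y = 0 then PySem.Set.ofList [v]
        else
          let prev : PySem.Set Int := PySem.Set.empty
          let prev := if 0 < x then PySem.Set.union prev (dp.getD y PySem.Set.empty) else prev
          let prev := if 0 < y then PySem.Set.union prev (ndp.getD (y - 1) PySem.Set.empty) else prev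
          PySem.Set.ofList (prev.map fun c => c + v)
      ndp ++ [cell])
    []

def isThereAPath_dfs_alt (grid : List (List Int)) : Bool :=
  let m := grid.length
  let n := (grid.headD []).length
  let dp := (List.range m).foldl (fun dp x => pvAltRow grid dp x n) []
  PySem.Set.contains (dp.getD (n - 1) PySem.Set.empty) 0

-- ===== PRECONDITION & SPEC =====
-- Pre_ excludes exactly the inputs where A raises IndexError: the empty grid, an empty
-- first row, or a later row shorter than the first (the DFS pops column n-1 of every row
-- on its first descent, before any True can be returned, so a short row always raises).
def Pre_isThereAPath_dfs (grid : List (List Int)) : Prop :=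
  grid ≠ [] ∧ 0 < (grid.headD []).length ∧
    ∀ row ∈ grid, (grid.headD []).length ≤ row.length
instance (grid : List (List Int)) : Decidable (Pre_isThereAPath_dfs grid) := by
  unfold Pre_isThereAPath_dfs; infer_instance

def pvWitness_isThereAPath_dfs : List (List Int) := [[1, 0], [0, 1]]

def Spec_isThereAPath_dfs (grid : List (List Int)) (out : Bool) : Prop := out = isThereAPath_dfs_alt grid
instance (grid : List (List Int)) (out : Bool) : Decidable (Spec_isThereAPath_dfs grid out) := by unfold Spec_isThereAPath_dfs; infer_instance

-- ===== CLAIM (what is proved, stated in full; the proofs are below) =====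
def Claim_equal_isThereAPath_dfs : Prop := ∀ (grid : List (List Int)), Dom_isThereAPath_dfs grid → Pre_isThereAPath_dfs grid → Spec_isThereAPath_dfs grid (isThereAPath_dfs grid)

-- ===== LEMMAS AND PROOFS =====

-- successors pushed by A's loop when expanding a state (empty at the goal cell)
def pvSucc (grid : List (List Int)) (m n : Nat) : Nat × Nat × Int → List (Nat × Nat × Int)
  | (x, y, c) =>
    let c' := pvNewCount grid x y c
    if x = m - 1 ∧ y = n - 1 then []
    else (if x < m ∧ y + 1 < n then [(x, y + 1, c')] else []) ++
         (if x + 1 < m ∧ y < n then [(x + 1, y, c')] else [])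

-- reachable states of A's search, grown from the start state
inductive pvReach (grid : List (List Int)) (m n : Nat) : Nat × Nat × Int → Prop
  | base : pvReach grid m n (0, 0, 0)
  | step {s t} : pvReach grid m n s → t ∈ pvSucc grid m n s → pvReach grid m n t

-- reachability from an arbitrary state (head-step form, for the stack invariant)
inductive pvRF (grid : List (List Int)) (m n : Nat) : Nat × Nat × Int → Nat × Nat × Int → Prop
  | refl (s) : pvRF grid m n s s
  | head {s t u} : t ∈ pvSucc grid m n s → pvRF grid m n t u → pvRF grid m n s u

def pvWin (grid : List (List Int)) (m n : Nat) : Nat × Nat × Int → Prop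
  | (x, y, c) => x = m - 1 ∧ y = n - 1 ∧ pvNewCount grid x y c = 0

def pvGoal (grid : List (List Int)) (m n : Nat) : Prop :=
  ∃ s, pvReach grid m n s ∧ pvWin grid m n s

def pvValidS (m n : Nat) : Nat × Nat × Int → Prop
  | (x, y, c) => x < m ∧ y < n ∧ -((x : Int) + y) ≤ c ∧ c ≤ (x : Int) + y

-- loop invariant of A's while loop
def pvInv (grid : List (List Int)) (m n : Nat)
    (stk : List (Nat × Nat × Int)) (vis : PySem.Set (Nat × Nat × Int)) : Prop :=
  (∀ s ∈ stk, pvReach grid m n s ∧ pvValidS m n s) ∧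
  (∀ v ∈ vis, ¬ pvWin grid m n v ∧ ∀ t ∈ pvSucc grid m n v, t ∈ vis ∨ t ∈ stk) ∧
  (∀ w, pvReach grid m n w → w ∈ vis ∨ ∃ s ∈ stk, pvRF grid m n s w)

-- fuel potential
def pvPhi (m n : Nat) (stk : List (Nat × Nat × Int)) (vis : PySem.Set (Nat × Nat × Int)) : Nat :=
  stk.length + 3 * ((pvAllStates m n).filter (fun s => ! PySem.Set.contains vis s)).length + 1

-- path sums of B's DP (value of the cell included), with the bounds of A's push conditions
inductive pvPSum (grid : List (List Int)) (m n : Nat) : Nat → Nat → Int → Prop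
  | base : 0 < m → 0 < n → pvPSum grid m n 0 0 (pvAltVal grid 0 0)
  | down {x y s} : pvPSum grid m n x y s → x + 1 < m →
      pvPSum grid m n (x + 1) y (s + pvAltVal grid (x + 1) y)
  | right {x y s} : pvPSum grid m n x y s → y + 1 < n →
      pvPSum grid m n x (y + 1) (s + pvAltVal grid x (y + 1))

theorem pvNewCount_eq (grid : List (List Int)) (x y : Nat) (c : Int) :
    pvNewCount grid x y c = c + pvAltVal grid x y := by
  unfold pvNewCount pvAltVal; split <;> ring

theorem mem_pvAllStates (m n : Nat) (s : Nat × Nat × Int) :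
    s ∈ pvAllStates m n ↔ pvValidS m n s := by
  obtain ⟨x, y, c⟩ := s
  simp only [pvAllStates, List.mem_flatMap, List.mem_map, List.mem_range, pvValidS,
    Prod.mk.injEq, List.pure_def, List.bind_eq_flatMap, List.mem_cons, List.not_mem_nil,
    or_false]
  constructor
  · rintro ⟨a, ha, b, hb, k, hk, h1, h2, h3⟩
    subst h1; subst h2
    obtain ⟨j, hj, rfl⟩ := hk
    refine ⟨ha, hb, ?_, ?_⟩ <;> omega
  · rintro ⟨hx, hy, hlo, hhi⟩
    exact ⟨x, hx, y, hy, (c + ((x : Int) + y)).toNat, ⟨(c + ((x : Int) + y)).toNat, by omega, rfl⟩, rfl, rfl, by omega⟩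

theorem pvFilter_length_lt {α : Type} (l : List α) (p q : α → Bool)
    (himp : ∀ a ∈ l, q a = true → p a = true) (x : α) (hx : x ∈ l)
    (hp : p x = true) (hq : q x = false) :
    (l.filter q).length + 1 ≤ (l.filter p).length := by
  induction l with
  | nil => cases hx
  | cons a t ih =>
    simp only [List.filter_cons]
    rcases List.mem_cons.mp hx with rfl | hxt
    · have h2 := List.countP_mono_left (l := t) (p := q) (q := p)
        (fun a ha h => himp a (List.mem_cons_of_mem _ ha) h)
      rw [List.countP_eq_length_filter, List.countP_eq_length_filter] at h2
      simp [hp, hq]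
      omega
    · have himp' : ∀ a ∈ t, q a = true → p a = true :=
        fun a ha h => himp a (List.mem_cons_of_mem _ ha) h
      have := ih himp' hxt
      by_cases hqa : q a = true
      · rw [hqa, himp a (List.mem_cons_self) hqa]
        simpa using this
      · rw [Bool.not_eq_true] at hqa
        rw [hqa]
        cases hpa : p a <;> simp <;> omega

theorem pvEscape (grid : List (List Int)) (m n : Nat)
    (vis stk : List (Nat × Nat × Int))
    (hclosed : ∀ v ∈ vis, ∀ t ∈ pvSucc grid m n v, t ∈ vis ∨ t ∈ stk) :
    ∀ v w, pvRF grid m n v w → v ∈ vis →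
      w ∈ vis ∨ ∃ s ∈ stk, pvRF grid m n s w := by
  intro v w h
  induction h with
  | refl s => exact fun hv => Or.inl hv
  | head hst hrf ih =>
    intro hv
    rcases hclosed _ hv _ hst with htv | hts
    · exact ih htv
    · exact Or.inr ⟨_, hts, hrf⟩

theorem pvRF_snoc {grid : List (List Int)} {m n : Nat} {s t u : Nat × Nat × Int}
    (h : pvRF grid m n s t) (hu : u ∈ pvSucc grid m n t) : pvRF grid m n s u := by
  induction h with
  | refl => exact .head hu (.refl _)
  | head hst _ ih => exact .head hst (ih hu)

theorem pvReach_iff (grid : List (List Int)) (m n : Nat) (s : Nat × Nat × Int) :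
    pvReach grid m n s ↔ pvRF grid m n (0, 0, 0) s := by
  constructor
  · intro h
    induction h with
    | base => exact .refl _
    | step _ hst ih => exact pvRF_snoc ih hst
  · intro h
    have aux : ∀ a b, pvRF grid m n a b → pvReach grid m n a → pvReach grid m n b := by
      intro a b hab
      induction hab with
      | refl => exact id
      | head hst _ ih => exact fun ha => ih (.step ha hst)
    exact aux _ _ h .base

theorem pvRF_cases {grid : List (List Int)} {m n : Nat} {s w : Nat × Nat × Int}
    (h : pvRF grid m n s w) : w = s ∨ ∃ t ∈ pvSucc grid m n s, pvRF grid m n t w := by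
  cases h with
  | refl => exact Or.inl rfl
  | head hst hrf => exact Or.inr ⟨_, hst, hrf⟩

theorem mem_pvSucc {grid : List (List Int)} {m n x y : Nat} {c : Int} {t : Nat × Nat × Int} :
    t ∈ pvSucc grid m n (x, y, c) ↔
      ¬(x = m - 1 ∧ y = n - 1) ∧
        ((x < m ∧ y + 1 < n ∧ t = (x, y + 1, pvNewCount grid x y c)) ∨
         (x + 1 < m ∧ y < n ∧ t = (x + 1, y, pvNewCount grid x y c))) := by
  simp only [pvSucc]
  split_ifs <;> simp <;> tauto

theorem pvSucc_valid {grid : List (List Int)} {m n : Nat} {s t : Nat × Nat × Int}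
    (hv : pvValidS m n s) (ht : t ∈ pvSucc grid m n s) : pvValidS m n t := by
  obtain ⟨x, y, c⟩ := s
  rcases mem_pvSucc.mp ht with ⟨-, ⟨h1, h2, rfl⟩ | ⟨h1, h2, rfl⟩⟩ <;>
    · obtain ⟨hx, hy, hlo, hhi⟩ := hv
      refine ⟨by omega, by omega, ?_, ?_⟩ <;>
        · rw [pvNewCount]
          split <;> (push_cast; omega)

theorem pvDfsLoop_cons (grid : List (List Int)) (m n f : Nat) (x y : Nat) (c0 : Int)
    (stk : List (Nat × Nat × Int)) (vis : PySem.Set (Nat × Nat × Int)) :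
    pvDfsLoop grid m n (f + 1) ((x, y, c0) :: stk) vis =
      if PySem.Set.contains vis (x, y, c0) = true then pvDfsLoop grid m n f stk vis
      else if x = m - 1 ∧ y = n - 1 then
        (if pvNewCount grid x y c0 = 0 then true
         else pvDfsLoop grid m n f stk (PySem.Set.add vis (x, y, c0)))
      else pvDfsLoop grid m n f (pvSucc grid m n (x, y, c0) ++ stk)
        (PySem.Set.add vis (x, y, c0)) := by
  by_cases h1 : PySem.Set.contains vis (x, y, c0) = true
  · simp [pvDfsLoop, (PySem.Set.contains_iff ..).mp h1]
  · have h1' : (x, y, c0) ∉ vis := fun hmem => h1 ((PySem.Set.contains_iff ..).mpr hmem)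
    by_cases h2 : x = m - 1 ∧ y = n - 1
    · obtain ⟨rfl, rfl⟩ := h2
      simp [pvDfsLoop, h1']
    · by_cases h3 : x < m ∧ y + 1 < n <;> by_cases h4 : x + 1 < m ∧ y < n <;>
        simp [pvDfsLoop, pvSucc, h1', h2, h3, h4]

theorem pvLoop_correct (grid : List (List Int)) (m n : Nat) :
    ∀ f stk vis, pvInv grid m n stk vis → pvPhi m n stk vis ≤ f →
      (pvDfsLoop grid m n f stk vis = true ↔ pvGoal grid m n) := by
  intro f
  induction f with
  | zero =>
    intro stk vis _ hphi
    exact absurd hphi (by simp [pvPhi])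
  | succ f ih =>
    intro stk vis hinv hphi
    obtain ⟨ha, hb, he⟩ := hinv
    match stk with
    | [] =>
      simp only [pvDfsLoop, Bool.false_eq_true, false_iff]
      rintro ⟨w, hw, hwin⟩
      rcases he w hw with hv | ⟨s, hs, _⟩
      · exact (hb _ hv).1 hwin
      · cases hs
    | cur :: stk =>
      obtain ⟨x, y, c0⟩ := cur
      by_cases hc : PySem.Set.contains vis (x, y, c0) = true
      · -- already visited: pop and continue
        have hstep : pvDfsLoop grid m n (f + 1) ((x, y, c0) :: stk) vis
            = pvDfsLoop grid m n f stk vis := by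
          show (if PySem.Set.contains vis (x, y, c0) then _ else _) = _
          rw [if_pos hc]
        rw [hstep]
        have hcv : (x, y, c0) ∈ vis := (PySem.Set.contains_iff ..).mp hc
        have hb' : ∀ v ∈ vis, ¬ pvWin grid m n v ∧
            ∀ t ∈ pvSucc grid m n v, t ∈ vis ∨ t ∈ stk := by
          intro v hv
          refine ⟨(hb v hv).1, fun t ht => ?_⟩
          rcases (hb v hv).2 t ht with h | h
          · exact Or.inl h
          · rcases List.mem_cons.mp h with rfl | h
            · exact Or.inl hcv
            · exact Or.inr h
        refine ih stk vis ⟨fun s hs => ha s (List.mem_cons_of_mem _ hs), hb', ?_⟩ ?_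
        · intro w hw
          rcases he w hw with hv | ⟨s, hs, hrf⟩
          · exact Or.inl hv
          · rcases List.mem_cons.mp hs with rfl | hs
            · exact pvEscape grid m n vis stk
                (fun v hv => (hb' v hv).2) _ _ hrf hcv
            · exact Or.inr ⟨s, hs, hrf⟩
        · simp only [pvPhi, List.length_cons] at hphi ⊢; omega
      · -- unvisited: expand
        have hcf : PySem.Set.contains vis (x, y, c0) = false := by
          simpa using hc
        have hcv : (x, y, c0) ∉ vis := fun h => hc ((PySem.Set.contains_iff ..).mpr h)
        have hreach : pvReach grid m n (x, y, c0) := (ha _ List.mem_cons_self).1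
        have hvalid : pvValidS m n (x, y, c0) := (ha _ List.mem_cons_self).2
        have hmemall : (x, y, c0) ∈ pvAllStates m n := (mem_pvAllStates ..).mpr hvalid
        have hselfadd : PySem.Set.contains (PySem.Set.add vis (x, y, c0)) (x, y, c0) = true :=
          (PySem.Set.contains_iff ..).mpr ((PySem.Set.mem_add ..).mpr (Or.inr rfl))
        have hFdec : ((pvAllStates m n).filter
              (fun s => ! PySem.Set.contains (PySem.Set.add vis (x, y, c0)) s)).length + 1
            ≤ ((pvAllStates m n).filter (fun s => ! PySem.Set.contains vis s)).length := by
          refine pvFilter_length_lt _ _ _ ?_ (x, y, c0) hmemall (by simp; exact hcv) (by simp [(PySem.Set.mem_add ..).mpr (Or.inr rfl)])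
          intro a _ hq
          rw [Bool.not_eq_true'] at hq ⊢
          by_contra hne
          rw [Bool.not_eq_false] at hne
          have h2 : PySem.Set.contains (PySem.Set.add vis (x, y, c0)) a = true :=
            (PySem.Set.contains_iff ..).mpr
              ((PySem.Set.mem_add ..).mpr (Or.inl ((PySem.Set.contains_iff ..).mp hne)))
          rw [h2] at hq; cases hq
        have hmemadd : ∀ t, t ∈ vis ∨ t = (x, y, c0) → t ∈ PySem.Set.add vis (x, y, c0) :=
          fun t h => (PySem.Set.mem_add ..).mpr h
        by_cases hg : x = m - 1 ∧ y = n - 1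
        · have hgwin : ∀ hz : pvNewCount grid x y c0 = 0, pvWin grid m n (x, y, c0) :=
            fun hz => ⟨hg.1, hg.2, hz⟩
          obtain ⟨rfl, rfl⟩ := hg
          by_cases hz : pvNewCount grid (m - 1) (n - 1) c0 = 0
          · have hstep : pvDfsLoop grid m n (f + 1) ((m - 1, n - 1, c0) :: stk) vis = true := by
              rw [pvDfsLoop_cons, if_neg hc, if_pos ⟨rfl, rfl⟩, if_pos hz]
            rw [hstep]
            simp only [true_iff]
            exact ⟨(m - 1, n - 1, c0), hreach, hgwin hz⟩
          · have hstep : pvDfsLoop grid m n (f + 1) ((m - 1, n - 1, c0) :: stk) vis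
                = pvDfsLoop grid m n f stk (PySem.Set.add vis (m - 1, n - 1, c0)) := by
              rw [pvDfsLoop_cons, if_neg hc, if_pos ⟨rfl, rfl⟩, if_neg hz]
            rw [hstep]
            have hsuccnil : pvSucc grid m n (m - 1, n - 1, c0) = [] := by
              simp [pvSucc]
            have hnwin : ¬ pvWin grid m n (m - 1, n - 1, c0) := fun hw => hz hw.2.2
            refine ih stk (PySem.Set.add vis (m - 1, n - 1, c0))
              ⟨fun s hs => ha s (List.mem_cons_of_mem _ hs), ?_, ?_⟩ ?_
            · intro v hv
              rcases (PySem.Set.mem_add ..).mp hv with hv | rfl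
              · refine ⟨(hb v hv).1, fun t ht => ?_⟩
                rcases (hb v hv).2 t ht with h | h
                · exact Or.inl (hmemadd t (Or.inl h))
                · rcases List.mem_cons.mp h with rfl | h
                  · exact Or.inl (hmemadd _ (Or.inr rfl))
                  · exact Or.inr h
              · exact ⟨hnwin, fun t ht => by rw [hsuccnil] at ht; cases ht⟩
            · intro w hw
              rcases he w hw with hv | ⟨s, hs, hrf⟩
              · exact Or.inl (hmemadd w (Or.inl hv))
              · rcases List.mem_cons.mp hs with rfl | hs
                · rcases pvRF_cases hrf with rfl | ⟨t, ht, _⟩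
                  · exact Or.inl (hmemadd _ (Or.inr rfl))
                  · rw [hsuccnil] at ht; cases ht
                · exact Or.inr ⟨s, hs, hrf⟩
            · simp only [pvPhi, List.length_cons] at hphi ⊢
              omega
        · -- interior cell: push the successors
          have hstep : pvDfsLoop grid m n (f + 1) ((x, y, c0) :: stk) vis
              = pvDfsLoop grid m n f (pvSucc grid m n (x, y, c0) ++ stk)
                  (PySem.Set.add vis (x, y, c0)) := by
            rw [pvDfsLoop_cons, if_neg hc, if_neg hg]
          rw [hstep]
          have hsucclen : (pvSucc grid m n (x, y, c0)).length ≤ 2 := by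
            simp only [pvSucc, if_neg hg]
            split_ifs <;> simp
          have hnwin : ¬ pvWin grid m n (x, y, c0) := fun hw => hg ⟨hw.1, hw.2.1⟩
          refine ih (pvSucc grid m n (x, y, c0) ++ stk) (PySem.Set.add vis (x, y, c0))
            ⟨?_, ?_, ?_⟩ ?_
          · intro s hs
            rcases List.mem_append.mp hs with h | h
            · exact ⟨.step hreach h, pvSucc_valid hvalid h⟩
            · exact ha s (List.mem_cons_of_mem _ h)
          · intro v hv
            rcases (PySem.Set.mem_add ..).mp hv with hv | rfl
            · refine ⟨(hb v hv).1, fun t ht => ?_⟩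
              rcases (hb v hv).2 t ht with h | h
              · exact Or.inl (hmemadd t (Or.inl h))
              · rcases List.mem_cons.mp h with rfl | h
                · exact Or.inl (hmemadd _ (Or.inr rfl))
                · exact Or.inr (List.mem_append.mpr (Or.inr h))
            · exact ⟨hnwin, fun t ht => Or.inr (List.mem_append.mpr (Or.inl ht))⟩
          · intro w hw
            rcases he w hw with hv | ⟨s, hs, hrf⟩
            · exact Or.inl (hmemadd w (Or.inl hv))
            · rcases List.mem_cons.mp hs with rfl | hs
              · rcases pvRF_cases hrf with rfl | ⟨t, ht, hrf'⟩
                · exact Or.inl (hmemadd _ (Or.inr rfl))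
                · exact Or.inr ⟨t, List.mem_append.mpr (Or.inl ht), hrf'⟩
              · exact Or.inr ⟨s, List.mem_append.mpr (Or.inr hs), hrf⟩
          · simp only [pvPhi, List.length_cons, List.length_append] at hphi ⊢
            omega

theorem pvPSum_lt {grid : List (List Int)} {m n x y : Nat} {s : Int}
    (h : pvPSum grid m n x y s) : x < m ∧ y < n := by
  induction h with
  | base hm hn => exact ⟨hm, hn⟩
  | down _ h ih => exact ⟨h, ih.2⟩
  | right _ h ih => exact ⟨ih.1, h⟩

theorem pvReach_psum (grid : List (List Int)) (m n : Nat) (hm : 0 < m) (hn : 0 < n) :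
    ∀ s : Nat × Nat × Int, pvReach grid m n s →
      pvPSum grid m n s.1 s.2.1 (s.2.2 + pvAltVal grid s.1 s.2.1) := by
  intro s h
  induction h with
  | base => simpa using pvPSum.base hm hn
  | @step s t hs ht ih =>
    obtain ⟨a, b, cc⟩ := s
    rcases mem_pvSucc.mp ht with ⟨-, ⟨h1, h2, rfl⟩ | ⟨h1, h2, rfl⟩⟩
    · simpa [pvNewCount_eq] using pvPSum.right ih h2
    · simpa [pvNewCount_eq] using pvPSum.down ih h1

theorem pvPSum_reach {grid : List (List Int)} {m n x y : Nat} {s : Int}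
    (h : pvPSum grid m n x y s) :
    pvReach grid m n (x, y, s - pvAltVal grid x y) := by
  induction h with
  | base hm hn => simp only [sub_self]; exact pvReach.base
  | @down a b sv hp h1 ih =>
    have hb : b < n := (pvPSum_lt hp).2
    refine .step ih (mem_pvSucc.mpr ⟨by omega, Or.inr ⟨h1, hb, ?_⟩⟩)
    rw [pvNewCount_eq]
    simp
  | @right a b sv hp h1 ih =>
    have ha : a < m := (pvPSum_lt hp).1
    refine .step ih (mem_pvSucc.mpr ⟨by omega, Or.inl ⟨ha, h1, ?_⟩⟩)
    rw [pvNewCount_eq]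
    simp

theorem pvGoal_iff_psum (grid : List (List Int)) (m n : Nat) (hm : 0 < m) (hn : 0 < n) :
    pvGoal grid m n ↔ pvPSum grid m n (m - 1) (n - 1) 0 := by
  constructor
  · rintro ⟨⟨x, y, c⟩, hr, hwx, hwy, hwz⟩
    subst hwx; subst hwy
    have h := pvReach_psum grid m n hm hn _ hr
    rw [pvNewCount_eq] at hwz
    simpa [hwz] using h
  · intro h
    refine ⟨(m - 1, n - 1, 0 - pvAltVal grid (m - 1) (n - 1)), pvPSum_reach h, rfl, rfl, ?_⟩
    rw [pvNewCount_eq]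
    ring

theorem pvPSum_inv {grid : List (List Int)} {m n x y : Nat} {s : Int}
    (h : pvPSum grid m n x y s) :
    (x = 0 ∧ y = 0 ∧ s = pvAltVal grid 0 0) ∨
    (0 < x ∧ pvPSum grid m n (x - 1) y (s - pvAltVal grid x y)) ∨
    (0 < y ∧ pvPSum grid m n x (y - 1) (s - pvAltVal grid x y)) := by
  cases h with
  | base => exact Or.inl ⟨rfl, rfl, rfl⟩
  | down hp h1 => exact Or.inr (Or.inl ⟨by omega, by simpa using hp⟩)
  | right hp h1 => exact Or.inr (Or.inr ⟨by omega, by simpa using hp⟩)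

theorem pvPSum_down' {grid : List (List Int)} {m n x y : Nat} {c : Int}
    (hx : 0 < x) (hxm : x < m) (hp : pvPSum grid m n (x - 1) y c) :
    pvPSum grid m n x y (c + pvAltVal grid x y) := by
  have hx1 : x - 1 + 1 = x := by omega
  have := pvPSum.down hp (by omega : x - 1 + 1 < m)
  rwa [hx1] at this

theorem pvPSum_right' {grid : List (List Int)} {m n x y : Nat} {c : Int}
    (hy : 0 < y) (hyn : y < n) (hp : pvPSum grid m n x (y - 1) c) :
    pvPSum grid m n x y (c + pvAltVal grid x y) := by
  have hy1 : y - 1 + 1 = y := by omega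
  have := pvPSum.right hp (by omega : y - 1 + 1 < n)
  rwa [hy1] at this

-- the inner-loop body of pvAltRow, named for the proofs (definitionally the same lambda)
def pvStep (grid : List (List Int)) (dp : List (PySem.Set Int)) (x : Nat)
    (ndp : List (PySem.Set Int)) (y : Nat) : List (PySem.Set Int) :=
  let v := pvAltVal grid x y
  let cell : PySem.Set Int :=
    if x = 0 ∧ y = 0 then PySem.Set.ofList [v]
    else
      let prev : PySem.Set Int := PySem.Set.empty
      let prev := if 0 < x then PySem.Set.union prev (dp.getD y PySem.Set.empty) else prev
      let prev := if 0 < y then PySem.Set.union prev (ndp.getD (y - 1) PySem.Set.empty) else prev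
      PySem.Set.ofList (prev.map fun c => c + v)
  ndp ++ [cell]

theorem pvAltRow_eq (grid : List (List Int)) (dp : List (PySem.Set Int)) (x n : Nat) :
    pvAltRow grid dp x n = (List.range n).foldl (pvStep grid dp x) [] := rfl

theorem pvCell_char (grid : List (List Int)) (m n x y : Nat) (hx : x < m) (hy : y < n)
    (dp ndp : List (PySem.Set Int))
    (hdpy : 0 < x → ∀ c : Int, c ∈ dp.getD y PySem.Set.empty ↔ pvPSum grid m n (x - 1) y c)
    (hndp : 0 < y → ∀ c : Int, c ∈ ndp.getD (y - 1) PySem.Set.empty ↔ pvPSum grid m n x (y - 1) c) :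
    ∀ s : Int, s ∈ ((pvStep grid dp x ndp y).getD ndp.length PySem.Set.empty) ↔
      pvPSum grid m n x y s := by
  intro s
  have hget : (pvStep grid dp x ndp y).getD ndp.length PySem.Set.empty
      = (if x = 0 ∧ y = 0 then PySem.Set.ofList [pvAltVal grid x y]
         else
           let prev : PySem.Set Int := PySem.Set.empty
           let prev := if 0 < x then PySem.Set.union prev (dp.getD y PySem.Set.empty) else prev
           let prev := if 0 < y then PySem.Set.union prev (ndp.getD (y - 1) PySem.Set.empty) else prev
           PySem.Set.ofList (prev.map fun c => c + pvAltVal grid x y)) := by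
    simp [pvStep]
  rw [hget]
  by_cases h00 : x = 0 ∧ y = 0
  · obtain ⟨rfl, rfl⟩ := h00
    simp only [and_self, if_true, PySem.Set.mem_ofList, List.mem_singleton]
    constructor
    · rintro rfl; exact pvPSum.base hx hy
    · intro h
      rcases pvPSum_inv h with ⟨-, -, rfl⟩ | ⟨h0, -⟩ | ⟨h0, -⟩ <;> first | rfl | omega
  · rw [if_neg h00]
    simp only [PySem.Set.mem_ofList, List.mem_map]
    have hprev : ∀ c : Int,
        (c ∈ (if 0 < y then
                PySem.Set.union
                  (if 0 < x then PySem.Set.union PySem.Set.empty (dp.getD y PySem.Set.empty)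
                   else PySem.Set.empty) (ndp.getD (y - 1) PySem.Set.empty)
              else
                (if 0 < x then PySem.Set.union PySem.Set.empty (dp.getD y PySem.Set.empty)
                 else PySem.Set.empty))) ↔
          ((0 < x ∧ c ∈ dp.getD y PySem.Set.empty) ∨
           (0 < y ∧ c ∈ ndp.getD (y - 1) PySem.Set.empty)) := by
      intro c
      split_ifs <;> simp [PySem.Set.mem_union, PySem.Set.empty] <;> tauto
    constructor
    · rintro ⟨c, hc, rfl⟩
      rcases (hprev c).mp hc with ⟨h0, hmem⟩ | ⟨h0, hmem⟩
      · exact pvPSum_down' h0 hx ((hdpy h0 c).mp hmem)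
      · exact pvPSum_right' h0 hy ((hndp h0 c).mp hmem)
    · intro h
      rcases pvPSum_inv h with ⟨hx0, hy0, -⟩ | ⟨h0, hp⟩ | ⟨h0, hp⟩
      · exact absurd ⟨hx0, hy0⟩ h00
      · exact ⟨s - pvAltVal grid x y, (hprev _).mpr (Or.inl ⟨h0, (hdpy h0 _).mpr hp⟩), by ring⟩
      · exact ⟨s - pvAltVal grid x y, (hprev _).mpr (Or.inr ⟨h0, (hndp h0 _).mpr hp⟩), by ring⟩

def pvRowChar (grid : List (List Int)) (m n x : Nat) (l : List (PySem.Set Int)) : Prop :=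
  l.length = n ∧ ∀ y < n, ∀ s : Int, s ∈ l.getD y PySem.Set.empty ↔ pvPSum grid m n x y s

theorem pvAltRow_char (grid : List (List Int)) (m n x : Nat) (hx : x < m)
    (dp : List (PySem.Set Int))
    (hdp : (x = 0 ∧ dp = []) ∨ (0 < x ∧ pvRowChar grid m n (x - 1) dp)) :
    pvRowChar grid m n x (pvAltRow grid dp x n) := by
  rw [pvAltRow_eq]
  suffices h : ∀ j, j ≤ n → ((List.range j).foldl (pvStep grid dp x) []).length = j ∧
      ∀ y < j, ∀ s : Int,
        s ∈ ((List.range j).foldl (pvStep grid dp x) []).getD y PySem.Set.empty ↔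
          pvPSum grid m n x y s from h n le_rfl
  intro j
  induction j with
  | zero => intro; simp
  | succ j ih =>
    intro hj
    obtain ⟨hlen, hch⟩ := ih (by omega)
    rw [List.range_succ, List.foldl_append, List.foldl_cons, List.foldl_nil]
    have hstep_len : (pvStep grid dp x ((List.range j).foldl (pvStep grid dp x) []) j).length
        = j + 1 := by
      simp [pvStep, hlen]
    refine ⟨hstep_len, ?_⟩
    intro y hy s
    rcases Nat.lt_succ_iff_lt_or_eq.mp hy with hlt | rfl
    · have hgd : (pvStep grid dp x ((List.range j).foldl (pvStep grid dp x) []) j).getD y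
          PySem.Set.empty
          = ((List.range j).foldl (pvStep grid dp x) []).getD y PySem.Set.empty := by
        show ((List.range j).foldl (pvStep grid dp x) [] ++ [_]).getD y _ = _
        exact List.getD_append _ _ _ _ (by omega)
      rw [hgd]
      exact hch y hlt s
    · have hcell := pvCell_char grid m n x y hx (by omega) dp
        ((List.range y).foldl (pvStep grid dp x) [])
        (fun h0 c => by
          rcases hdp with ⟨rfl, -⟩ | ⟨-, -, hr⟩
          · omega
          · exact hr y (by omega) c)
        (fun h0 c => hch (y - 1) (by omega) c)
        s
      rwa [hlen] at hcell

theorem pvDp_char (grid : List (List Int)) (m n : Nat) :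
    ∀ x, 0 < x → x ≤ m →
      pvRowChar grid m n (x - 1)
        ((List.range x).foldl (fun dp x => pvAltRow grid dp x n) []) := by
  intro x
  induction x with
  | zero => omega
  | succ x ih =>
    intro _ hxm
    rw [List.range_succ, List.foldl_append, List.foldl_cons, List.foldl_nil]
    rcases Nat.eq_zero_or_pos x with rfl | hx0
    · simpa using pvAltRow_char grid m n 0 (by omega) [] (Or.inl ⟨rfl, rfl⟩)
    · simpa using pvAltRow_char grid m n x (by omega) _ (Or.inr ⟨hx0, ih hx0 (by omega)⟩)

theorem pvA_iff (grid : List (List Int)) (hm : 0 < grid.length)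
    (hn : 0 < (grid.headD []).length) :
    (isThereAPath_dfs grid = true) ↔
      pvGoal grid grid.length (grid.headD []).length := by
  have hfilter : ((pvAllStates grid.length (grid.headD []).length).filter
      (fun s => ! PySem.Set.contains PySem.Set.empty s)).length
      = (pvAllStates grid.length (grid.headD []).length).length := by
    simp [PySem.Set.contains, PySem.Set.empty]
  show pvDfsLoop grid _ _ _ [(0, 0, 0)] PySem.Set.empty = true ↔ _
  rw [pvLoop_correct grid _ _ _ [(0, 0, 0)] PySem.Set.empty ?_ ?_]
  · refine ⟨?_, ?_, ?_⟩
    · rintro s hs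
      rcases List.mem_singleton.mp hs with rfl
      exact ⟨.base, hm, hn, by norm_num⟩
    · rintro v hv
      cases hv
    · intro w hw
      exact Or.inr ⟨(0, 0, 0), List.mem_singleton.mpr rfl, (pvReach_iff ..).mp hw⟩
  · rw [pvPhi, hfilter]
    simp
    omega

theorem pvB_iff (grid : List (List Int)) (hm : 0 < grid.length)
    (hn : 0 < (grid.headD []).length) :
    (isThereAPath_dfs_alt grid = true) ↔
      pvPSum grid grid.length (grid.headD []).length
        (grid.length - 1) ((grid.headD []).length - 1) 0 := by
  obtain ⟨hlen, hch⟩ := pvDp_char grid grid.length (grid.headD []).length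
    grid.length hm le_rfl
  show PySem.Set.contains _ 0 = true ↔ _
  rw [PySem.Set.contains_iff]
  exact hch ((grid.headD []).length - 1) (by omega) 0

-- ===== VERDICT (by name: the statement is the Claim_ definition above) =====
theorem isThereAPath_dfs_spec : Claim_equal_isThereAPath_dfs := by
  intro grid _ hpre
  obtain ⟨hne, hn, -⟩ := hpre
  have hm : 0 < grid.length := List.length_pos_iff.mpr hne
  unfold Spec_isThereAPath_dfs
  have h : (isThereAPath_dfs grid = true) ↔ (isThereAPath_dfs_alt grid = true) := by
    rw [pvA_iff grid hm hn, pvB_iff grid hm hn,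
      pvGoal_iff_psum grid grid.length (grid.headD []).length hm hn]
  exact Bool.eq_iff_iff.mpr h
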